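-- pv_equiv track=rewrite | github.com/gggfddf/home | price_action_analysis.py | _find_frequent_sequences
-- ===== SOURCE A (Python) =====
-- def _find_frequent_sequences(sequences):
--     """Find frequent candlestick sequences"""
--     sequence_patterns = {}
--     sequence_length = 3
--
--     for i in range(len(sequences) - sequence_length + 1):
--         pattern = tuple(sequences[i:i + sequence_length])
--
--         if pattern not in sequence_patterns:
--             sequence_patterns[pattern] = []
--
--         sequence_patterns[pattern].append(i)
--
--     # Filter frequent patterns
--     frequent_patterns = {k: v for k, v in sequence_patterns.items() if len(v) >= 5}
--
--     return frequent_patterns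
-- ===== SOURCE B (Python) =====
-- def _find_frequent_sequences(sequences):
--     """Find frequent candlestick sequences.
--
--     Different decomposition: materialise the list of all length-3 windows once,
--     then for each distinct window (first-occurrence order, via dict.fromkeys)
--     keep it iff it occurs at least 5 times, gathering its positions by a scan
--     over the window list.
--     """
--     n = len(sequences)
--     windows = [tuple(sequences[i:i + 3]) for i in range(n - 2)]
--     return {w: [j for j, w2 in enumerate(windows) if w2 == w]
--             for w in dict.fromkeys(windows)
--             if windows.count(w) >= 5}
-- ===== Notes on version B (the rewrite author's own statement) =====
-- stated objective: alternative
-- what changed: A builds a dict of position lists incrementally while sliding the window and filters it afterwards; B materialises the window list once, deduplicates it to get the distinct patterns in first-occurrence order, and gathers each frequent pattern's positions by scanning the window list.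
import Mathlib
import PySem

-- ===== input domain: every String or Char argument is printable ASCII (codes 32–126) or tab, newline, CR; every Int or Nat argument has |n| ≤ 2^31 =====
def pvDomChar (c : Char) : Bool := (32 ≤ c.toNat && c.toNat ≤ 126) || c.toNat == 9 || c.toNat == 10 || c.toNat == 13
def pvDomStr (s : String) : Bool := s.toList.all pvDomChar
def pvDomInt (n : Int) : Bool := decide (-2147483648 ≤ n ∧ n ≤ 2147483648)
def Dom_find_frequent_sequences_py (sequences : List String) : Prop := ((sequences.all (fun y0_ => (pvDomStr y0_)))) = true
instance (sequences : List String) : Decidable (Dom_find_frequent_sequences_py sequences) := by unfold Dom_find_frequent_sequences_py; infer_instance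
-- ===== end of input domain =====

-- B replaces A's incremental dict-of-positions build by a window list that is deduplicated and
-- scanned per distinct pattern (alternative decomposition, not claimed faster); return values proved equal.


-- ===== PORT A =====
def find_frequent_sequences_py (sequences : List String) : List (List String × List Int) :=
  let sequence_length : Int := 3
  let sequence_patterns : PySem.Dict (List String) (List Int) :=
    (PySem.List.pyRange 0 ((sequences.length : Int) - sequence_length + 1) 1).foldl
      (fun d i =>
        let pattern := PySem.List.slice sequences (some i) (some (i + sequence_length))
        let d := if d.contains pattern then d else d.insert pattern []
        d.modify pattern [] (fun l => l ++ [i]))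
      PySem.Dict.empty
  sequence_patterns.items.filter (fun kv => decide (5 ≤ kv.2.length))

-- ===== PORT B =====
def find_frequent_sequences_py_alt (sequences : List String) : List (List String × List Int) :=
  let n : Int := sequences.length
  let windows := (PySem.List.pyRange 0 (n - 2) 1).map
    (fun i => PySem.List.slice sequences (some i) (some (i + 3)))
  ((PySem.List.dedup windows).filter (fun w => decide (5 ≤ windows.count w))).map
    (fun w => (w, (PySem.List.enumerate windows).filterMap
      (fun p => if p.2 = w then some p.1 else none)))

-- ===== PRECONDITION & SPEC =====
def Spec_find_frequent_sequences_py (sequences : List String) (out : List (List String × List Int)) : Prop := out = find_frequent_sequences_py_alt sequences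
instance (sequences : List String) (out : List (List String × List Int)) : Decidable (Spec_find_frequent_sequences_py sequences out) := by unfold Spec_find_frequent_sequences_py; infer_instance

-- ===== CLAIM (what is proved, stated in full; the proofs are below) =====
def Claim_equal_find_frequent_sequences_py : Prop := ∀ (sequences : List String), Dom_find_frequent_sequences_py sequences → Spec_find_frequent_sequences_py sequences (find_frequent_sequences_py sequences)

-- ===== LEMMAS AND PROOFS =====

-- A's "if absent, insert the empty list" followed by the append-modify is the plain append-modify.
theorem pv_absorb (d : PySem.Dict (List String) (List Int)) (p : List String) (f : List Int → List Int) :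
    (if d.contains p then d else d.insert p []).modify p [] f = d.modify p [] f := by
  by_cases h : d.contains p = true
  · simp [h]
  · have hg : d.getD p [] = [] := PySem.Dict.getD_of_not_contains d [] (by simpa using h)
    simp only [h, Bool.false_eq_true, if_false, PySem.Dict.modify,
      PySem.Dict.getD_insert_self, PySem.Dict.insert_insert_self, hg]

-- enumerate of a list built by mapping over range a..b, started at a, pairs each index with its element.
theorem pv_enum_map (f : Int → List String) (a b : Int) :
    PySem.List.enumerate ((PySem.List.pyRange a b 1).map f) a
      = (PySem.List.pyRange a b 1).map (fun i => (i, f i)) := by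
  rcases le_or_gt b a with h | h
  · simp [PySem.List.pyRange_one_eq_nil h]
  · obtain ⟨k, hk⟩ : ∃ k : Nat, b = a + k := ⟨(b - a).toNat, by omega⟩
    subst hk
    clear h
    induction k generalizing a with
    | zero => simp
    | succ m ih =>
      rw [PySem.List.pyRange_one_cons (by push_cast; omega)]
      have h2 : a + ((m:Nat) + 1 : Nat) = (a + 1) + (m : Nat) := by push_cast; ring
      simp only [List.map_cons, PySem.List.enumerate_cons, h2, ih (a + 1)]

-- a guarded filterMap that keeps the element itself is a filter.
theorem pv_filterMap_guard {α β : Type} [DecidableEq β] (g : α → β) (k : β) (l : List α) :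
    l.filterMap (fun i => if g i = k then some i else none) = l.filter (fun i => g i == k) := by
  induction l with
  | nil => rfl
  | cons x xs ih => by_cases h : g x = k <;> simp [h, ih]

-- ===== VERDICT (by name: the statement is the Claim_ definition above) =====
theorem find_frequent_sequences_py_spec : Claim_equal_find_frequent_sequences_py := by
  intro s _
  unfold Spec_find_frequent_sequences_py
  unfold find_frequent_sequences_py find_frequent_sequences_py_alt
  have h32 : (s.length : Int) - 3 + 1 = (s.length : Int) - 2 := by ring
  simp only [h32]
  set rs := PySem.List.pyRange 0 ((s.length : Int) - 2) 1 with hrs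
  set win : Int → List String := fun i => PySem.List.slice s (some i) (some (i + 3)) with hwin
  have habs : (rs.foldl
      (fun d i => (if d.contains (PySem.List.slice s (some i) (some (i + 3))) = true then d
            else d.insert (PySem.List.slice s (some i) (some (i + 3))) []).modify
          (PySem.List.slice s (some i) (some (i + 3))) [] (fun l => l ++ [i]))
      PySem.Dict.empty)
      = rs.foldl (fun d i => d.modify (win i) [] (fun l => l ++ [i])) PySem.Dict.empty := by
    congr 1
    funext d i
    exact pv_absorb d (win i) _
  rw [habs]
  set dict := rs.foldl (fun d i => d.modify (win i) [] (fun l => l ++ [i])) PySem.Dict.empty with hdict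
  have hnd : dict.keys.Nodup := by
    rw [hdict]
    exact PySem.Dict.nodup_keys_foldl_modify_key rs win [] (fun d i => (fun l => l ++ [i])) _ (by simp)
  have hkeys : dict.keys = PySem.List.dedup (rs.map win) := by
    rw [hdict]
    rw [PySem.Dict.keys_foldl_modify_key rs win [] (fun d i => (fun l => l ++ [i]))]
    simp [PySem.Set.update_nil_left]
  have hgetD : ∀ k, dict.getD k [] = rs.filter (fun i => win i == k) := by
    intro k
    have h1 := PySem.Dict.getD_foldl_modify_append (rs.map (fun i => (win i, i))) PySem.Dict.empty k
    simp only [List.foldl_map] at h1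
    rw [hdict, h1]
    simp [List.filter_map, List.map_map, Function.comp_def]
  have hitems : dict.items = dict.keys.map (fun k => (k, rs.filter (fun i => win i == k))) := by
    rw [PySem.Dict.items_eq_map_keys dict hnd []]
    exact List.map_congr_left (fun k _ => by rw [hgetD k])
  rw [hitems, hkeys, List.filter_map]
  have henum : PySem.List.enumerate (rs.map win)
      = rs.map (fun i => (i, win i)) := pv_enum_map win 0 ((s.length : Int) - 2)
  rw [henum]
  have hpos : ∀ w, (rs.map (fun i => (i, win i))).filterMap (fun p => if p.2 = w then some p.1 else none)
      = rs.filter (fun i => win i == w) := by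
    intro w
    rw [List.filterMap_map]
    have : ((fun p => if p.2 = w then some p.1 else none) ∘ (fun i => (i, win i)))
        = fun i => if win i = w then some (i : Int) else none := by
      funext i; simp
    rw [this, pv_filterMap_guard win w rs]
    simp only [Bool.beq_eq_decide_eq]

  have hcnt : ∀ w : List String, List.count w (rs.map win) = (rs.filter (fun i => win i == w)).length := by
    intro w
    simp only [List.count_eq_countP, List.countP_map, Function.comp_def, Bool.beq_eq_decide_eq,
      ← List.countP_eq_length_filter]
  congr 1
  case e_f =>
    funext w
    rw [hpos w]
  case e_l =>
    apply List.filter_congr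
    intro k _
    simp only [Function.comp_apply]
    rw [hcnt k]
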